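-- pv_equiv track=rewrite | github.com/ouzdeville/AbgebraicCode | polynome_F2^m.py | poly_somme2
-- ===== SOURCE A (Python) =====
-- def polynome(p):
--     n=len(p)
--     while p[n-1]==0 and n>1:
--         del(p[n-1])
--         n=len(p)
--     return p
--
-- def poly_somme2(p,q):
--     n=len(p)
--     m=len(q)
--     s=[]
--     if n==m:
--         for i in range(m):
--             s.append((p[i] + q[i])%2)
--         return polynome(s)
--     elif n>m:
--         for i in range(m):
--             s.append((p[i] + q[i])%2)
--         for i in range(n-m):
--             s.append(p[m+i])
--         return polynome(s)
--     else:
--         for i in range(n):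
--             s.append((p[i] + q[i])%2)
--         for i in range(m-n):
--             s.append(q[n+i])
--         return polynome(s)
-- ===== SOURCE B (Python) =====
-- def poly_somme2(p, q):
--     out = []
--     for i in range(max(len(p), len(q)) - 1, -1, -1):
--         if i < len(p) and i < len(q):
--             h = (p[i] + q[i]) % 2
--         elif i < len(p):
--             h = p[i]
--         else:
--             h = q[i]
--         if out or h != 0:
--             out.append(h)
--     out.reverse()
--     return out if out else [0]
-- ===== Notes on version B (the rewrite author's own statement) =====
-- stated objective: alternative
-- what changed: Replaces A's staged construction (three-way n==m/n>m/n<m branch, forward append loops, then a destructive while-delete trim helper) by a single backward pass: iterate indices from the highest coefficient down, skip zeros until the first nonzero is seen (trimming fused into the traversal), append, and reverse once at the end.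
import Mathlib
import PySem

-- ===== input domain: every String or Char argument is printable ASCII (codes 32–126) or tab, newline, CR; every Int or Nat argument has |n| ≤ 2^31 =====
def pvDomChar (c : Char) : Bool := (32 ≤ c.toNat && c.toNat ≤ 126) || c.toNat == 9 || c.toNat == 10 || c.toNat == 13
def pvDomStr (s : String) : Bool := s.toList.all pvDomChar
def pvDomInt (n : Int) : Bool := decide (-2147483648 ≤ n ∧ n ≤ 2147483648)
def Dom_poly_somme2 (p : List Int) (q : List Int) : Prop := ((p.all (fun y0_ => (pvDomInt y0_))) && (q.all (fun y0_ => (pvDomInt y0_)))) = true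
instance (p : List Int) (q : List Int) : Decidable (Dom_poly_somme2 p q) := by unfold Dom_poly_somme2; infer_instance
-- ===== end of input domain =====

-- B walks the coefficients ONCE, backwards (highest index first), skipping the trailing
-- zeros before anything is emitted and reversing at the end: a different decomposition that
-- fuses A's staged build (three-way length branch + two loops + destructive trim helper)
-- into a single backward pass; same cost.

-- ===== PORT A =====
-- A's helper `polynome`: while p[n-1]==0 and n>1: del p[n-1]
def pvTrimA (s : List Int) : List Int :=
  if PySem.List.pyGetD s (-1) 0 = 0 ∧ s.length > 1 then pvTrimA s.dropLast else s
termination_by s.length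
decreasing_by simp [List.length_dropLast]; omega

def poly_somme2 (p : List Int) (q : List Int) : List Int :=
  let n : Int := p.length
  let m : Int := q.length
  if n = m then
    pvTrimA ((PySem.List.pyRange 0 m 1).foldl
      (fun s i => s ++ [PySem.Int.mod (PySem.List.pyGetD p i 0 + PySem.List.pyGetD q i 0) 2]) [])
  else if n > m then
    let s1 := (PySem.List.pyRange 0 m 1).foldl
      (fun s i => s ++ [PySem.Int.mod (PySem.List.pyGetD p i 0 + PySem.List.pyGetD q i 0) 2]) []
    pvTrimA ((PySem.List.pyRange 0 (n - m) 1).foldl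
      (fun s i => s ++ [PySem.List.pyGetD p (m + i) 0]) s1)
  else
    let s1 := (PySem.List.pyRange 0 n 1).foldl
      (fun s i => s ++ [PySem.Int.mod (PySem.List.pyGetD p i 0 + PySem.List.pyGetD q i 0) 2]) []
    pvTrimA ((PySem.List.pyRange 0 (m - n) 1).foldl
      (fun s i => s ++ [PySem.List.pyGetD q (n + i) 0]) s1)

-- ===== PORT B =====
-- for i in range(max(len(p),len(q))-1, -1, -1): compute h; if out or h != 0: out.append(h)
-- then out.reverse(); return out if out else [0]
def poly_somme2_alt (p : List Int) (q : List Int) : List Int :=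
  let out := (PySem.List.pyRange ((max p.length q.length : Nat) - 1 : Int) (-1) (-1)).foldl
    (fun out i =>
      let h : Int :=
        if i < (p.length : Int) ∧ i < (q.length : Int) then
          PySem.Int.mod (PySem.List.pyGetD p i 0 + PySem.List.pyGetD q i 0) 2
        else if i < (p.length : Int) then PySem.List.pyGetD p i 0
        else PySem.List.pyGetD q i 0
      if out ≠ [] ∨ h ≠ 0 then out ++ [h] else out) []
  let out := out.reverse
  if out ≠ [] then out else [0]

-- ===== PRECONDITION & SPEC =====
-- Pre_ excludes only p = [] ∧ q = [], where A raises IndexError (polynome indexes an empty list).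
def Pre_poly_somme2 (p : List Int) (q : List Int) : Prop := p ≠ [] ∨ q ≠ []
instance (p : List Int) (q : List Int) : Decidable (Pre_poly_somme2 p q) := by
  unfold Pre_poly_somme2; infer_instance

def pvWitness_poly_somme2 : List Int × List Int := ([1, 0, 1], [1])

def Spec_poly_somme2 (p : List Int) (q : List Int) (out : List Int) : Prop := out = poly_somme2_alt p q
instance (p : List Int) (q : List Int) (out : List Int) : Decidable (Spec_poly_somme2 p q out) := by unfold Spec_poly_somme2; infer_instance

-- ===== CLAIM (what is proved, stated in full; the proofs are below) =====
def Claim_equal_poly_somme2 : Prop := ∀ (p : List Int) (q : List Int), Dom_poly_somme2 p q → Pre_poly_somme2 p q → Spec_poly_somme2 p q (poly_somme2 p q)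

-- ===== LEMMAS AND PROOFS =====

-- the coefficient of the raw (untrimmed) sum at index i
def pvCoef (p q : List Int) (i : Nat) : Int :=
  if i < p.length ∧ i < q.length then PySem.Int.mod (p.getD i 0 + q.getD i 0) 2
  else if i < p.length then p.getD i 0 else q.getD i 0

-- the raw sum list
def pvSum (p q : List Int) : List Int := (List.range (max p.length q.length)).map (pvCoef p q)

-- trailing zeros removed entirely (possibly yielding [])
def goTrim : List Int → List Int
  | [] => []
  | h :: t => let r := goTrim t; if r ≠ [] ∨ h ≠ 0 then h :: r else []

-- ---------- A-side ----------

theorem pv_prefix_eq (p q : List Int) (k : Nat) :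
    (PySem.List.pyRange 0 (k : Int) 1).foldl
      (fun s i => s ++ [PySem.Int.mod (PySem.List.pyGetD p i 0 + PySem.List.pyGetD q i 0) 2]) []
    = (List.range k).map (fun i => PySem.Int.mod (p.getD i 0 + q.getD i 0) 2) := by
  rw [PySem.List.pyRange_zero_natCast, PySem.List.foldl_append_singleton_eq_map]
  simp [List.map_map, Function.comp_def]

theorem pv_tail_eq (xs : List Int) (k : Nat) (hk : k ≤ xs.length) (acc : List Int) :
    (PySem.List.pyRange 0 ((xs.length : Int) - (k : Int)) 1).foldl
      (fun s i => s ++ [PySem.List.pyGetD xs ((k : Int) + i) 0]) acc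
    = acc ++ xs.drop k := by
  have h1 : (xs.length : Int) - (k : Int) = ((xs.length - k : Nat) : Int) := by omega
  rw [h1, PySem.List.pyRange_zero_natCast, PySem.List.foldl_append_singleton_eq_map]
  congr 1
  apply List.ext_getElem
  · simp
  · intro i h1' h2'
    simp only [List.getElem_map, List.getElem_range, List.getElem_drop]
    have : (k : Int) + (i : Int) = ((k + i : Nat) : Int) := by push_cast; ring
    rw [this, PySem.List.pyGetD_natCast]
    have hlt : k + i < xs.length := by simp at h1'; omega
    simp [List.getD_eq_getElem?_getD, List.getElem?_eq_getElem hlt]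

-- the raw sum equals XOR-prefix ++ raw tails
theorem pvSum_eq (p q : List Int) :
    pvSum p q
    = (List.range (min p.length q.length)).map
        (fun i => PySem.Int.mod (p.getD i 0 + q.getD i 0) 2)
      ++ p.drop (min p.length q.length) ++ q.drop (min p.length q.length) := by
  unfold pvSum
  apply List.ext_getElem
  · simp; omega
  · intro i h1 h2
    set k := min p.length q.length with hk
    simp only [List.length_map, List.length_range] at h1
    simp only [List.getElem_map, List.getElem_range]
    by_cases hik : i < k
    · rw [List.getElem_append_left (by simp; omega), List.getElem_append_left (by simp; omega)]
      simp only [List.getElem_map, List.getElem_range]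
      unfold pvCoef
      rw [if_pos (by omega)]
    · unfold pvCoef
      by_cases hpq : p.length ≤ q.length
      · have hkp : k = p.length := by omega
        have hiq : i < q.length := by omega
        rw [if_neg (by omega), if_neg (by omega)]
        rw [List.getElem_append_right (by simp; omega)]
        simp only [List.getElem_drop, List.length_append, List.length_map, List.length_range,
          List.length_drop]
        rw [List.getD_eq_getElem?_getD, List.getElem?_eq_getElem hiq]
        simp only [Option.getD_some]
        congr 1
        omega
      · have hkq : k = q.length := by omega
        have hip : i < p.length := by omega
        rw [if_neg (by omega), if_pos hip]
        rw [List.getElem_append_left (by simp; omega), List.getElem_append_right (by simp; omega)]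
        simp only [List.getElem_drop, List.length_map, List.length_range]
        rw [List.getD_eq_getElem?_getD, List.getElem?_eq_getElem hip]
        simp only [Option.getD_some]
        congr 1
        omega

theorem A_eq_trim_sum (p q : List Int) : poly_somme2 p q = pvTrimA (pvSum p q) := by
  unfold poly_somme2
  rw [pvSum_eq]
  by_cases hnm : (p.length : Int) = (q.length : Int)
  · have hmin : min p.length q.length = q.length := by omega
    have hp : p.drop q.length = [] := by apply List.drop_eq_nil_of_le; omega
    have hq : q.drop q.length = [] := by simp
    simp only [hnm, if_true, hmin, hp, hq, List.append_nil]
    rw [pv_prefix_eq p q q.length]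
  · by_cases hgt : (p.length : Int) > (q.length : Int)
    · have hmin : min p.length q.length = q.length := by omega
      have hq : q.drop q.length = [] := by simp
      simp only [hnm, if_false, hgt, if_true, hmin, hq, List.append_nil]
      rw [pv_prefix_eq p q q.length, pv_tail_eq p q.length (by omega)]
    · have hmin : min p.length q.length = p.length := by omega
      have hp : p.drop p.length = [] := by simp
      simp only [hnm, if_false, hgt, if_false, hmin, hp, List.append_nil]
      rw [pv_prefix_eq p q p.length, pv_tail_eq q p.length (by omega)]

-- ---------- goTrim facts ----------

theorem goTrim_append_zero (s : List Int) : goTrim (s ++ [(0 : Int)]) = goTrim s := by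
  induction s with
  | nil => simp [goTrim]
  | cons h t ih => simp [goTrim, ih]

theorem goTrim_append_ne (s : List Int) (x : Int) (hx : x ≠ 0) :
    goTrim (s ++ [x]) = s ++ [x] := by
  induction s with
  | nil => simp [goTrim, hx]
  | cons h t ih => simp [goTrim, ih]

-- A's trim versus goTrim, on nonempty lists
theorem trimA_char (s : List Int) (hs : s ≠ []) :
    pvTrimA s = if goTrim s = [] then [0] else goTrim s := by
  induction s using pvTrimA.induct with
  | case1 s h ih =>
      obtain ⟨h0, h1⟩ := h
      have hs' : s ≠ [] := hs
      have hlast : s = s.dropLast ++ [(0 : Int)] := by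
        conv_lhs => rw [← List.dropLast_concat_getLast hs']
        rw [PySem.List.pyGetD_neg_one s 0 hs'] at h0
        rw [h0]
      have hdne : s.dropLast ≠ [] := by
        intro hnil
        have := congrArg List.length hlast
        simp [hnil] at this
        omega
      rw [pvTrimA, if_pos ⟨h0, h1⟩, ih hdne]
      conv_rhs => rw [hlast, goTrim_append_zero]
  | case2 s h =>
      rw [pvTrimA, if_neg h]
      rcases List.eq_nil_or_concat s with rfl | ⟨t, x, rfl⟩
      · exact absurd rfl hs
      · simp only [List.concat_eq_append] at h ⊢
        by_cases hx : x = 0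
        · subst hx
          have ht : t = [] := by
            rcases t with _ | ⟨a, t'⟩
            · rfl
            · exfalso; apply h; constructor
              · show PySem.List.pyGetD ((a :: t') ++ [0]) (-1) 0 = 0
                exact PySem.List.pyGetD_neg_one_append_singleton _ _ _
              · simp
          subst ht
          simp [goTrim]
        · rw [goTrim_append_ne t x hx, if_neg (by simp)]

-- ---------- B-side ----------

-- the coefficient formula with an Int index, exactly as in the port of B
def pvCoefI (p q : List Int) (i : Int) : Int :=
  if i < (p.length : Int) ∧ i < (q.length : Int) then
    PySem.Int.mod (PySem.List.pyGetD p i 0 + PySem.List.pyGetD q i 0) 2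
  else if i < (p.length : Int) then PySem.List.pyGetD p i 0
  else PySem.List.pyGetD q i 0

theorem pvCoefI_natCast (p q : List Int) (k : Nat) :
    pvCoefI p q (k : Int) = pvCoef p q k := by
  simp [pvCoefI, pvCoef, PySem.List.pyGetD_natCast]

theorem foldr_goTrim (c : Int → Int) (l : List Int) :
    l.foldr (fun i out => if out ≠ [] ∨ c i ≠ 0 then out ++ [c i] else out) []
    = (goTrim (l.map c)).reverse := by
  induction l with
  | nil => simp [goTrim]
  | cons a t ih =>
      simp only [List.foldr_cons, List.map_cons, goTrim, ih]
      by_cases hr : goTrim (t.map c) = [] <;> by_cases hc : c a = 0 <;> simp [hr, hc]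

theorem B_eq (p q : List Int) :
    poly_somme2_alt p q
    = (if goTrim (pvSum p q) ≠ [] then goTrim (pvSum p q) else [0]) := by
  unfold poly_somme2_alt
  have hbody : (fun (i : Int) (out : List Int) =>
      (fun out (i : Int) =>
        let h : Int :=
          if i < (p.length : Int) ∧ i < (q.length : Int) then
            PySem.Int.mod (PySem.List.pyGetD p i 0 + PySem.List.pyGetD q i 0) 2
          else if i < (p.length : Int) then PySem.List.pyGetD p i 0
          else PySem.List.pyGetD q i 0
        if out ≠ [] ∨ h ≠ 0 then out ++ [h] else out) out i)
      = (fun i out => if out ≠ [] ∨ pvCoefI p q i ≠ 0 then out ++ [pvCoefI p q i] else out) := rfl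
  have hmap : (PySem.List.pyRange 0 ((max p.length q.length : Nat) : Int) 1).map (pvCoefI p q)
      = pvSum p q := by
    unfold pvSum
    rw [PySem.List.pyRange_zero_natCast, List.map_map]
    exact List.map_congr_left (fun k _ => pvCoefI_natCast p q k)
  rw [PySem.List.pyRange_neg_one_eq_reverse,
      show (-1 : Int) + 1 = 0 by ring,
      show ((max p.length q.length : Nat) - 1 : Int) + 1
        = ((max p.length q.length : Nat) : Int) by ring,
      List.foldl_reverse, hbody, foldr_goTrim, hmap]
  simp only [List.reverse_reverse]

theorem pvSum_ne_nil (p q : List Int) (h : p ≠ [] ∨ q ≠ []) : pvSum p q ≠ [] := by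
  intro hnil
  have hlen : max p.length q.length = 0 := by
    have := congrArg List.length hnil
    simpa [pvSum] using this
  have hp : p = [] := List.length_eq_zero_iff.mp (by omega)
  have hq : q = [] := List.length_eq_zero_iff.mp (by omega)
  tauto

theorem poly_somme2_eq (p q : List Int) (h : p ≠ [] ∨ q ≠ []) :
    poly_somme2 p q = poly_somme2_alt p q := by
  rw [A_eq_trim_sum, trimA_char _ (pvSum_ne_nil p q h), B_eq]
  by_cases hg : goTrim (pvSum p q) = [] <;> simp [hg]

-- ===== VERDICT (by name: the statement is the Claim_ definition above) =====
theorem poly_somme2_spec : Claim_equal_poly_somme2 := by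
  intro p q _ hpre
  unfold Spec_poly_somme2
  exact poly_somme2_eq p q hpre
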